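-- pv_equiv track=rewrite | github.com/sujoung/MovieRecommender | kmeans.py | total_weighted_ratings
-- ===== SOURCE A (Python) =====
-- def total_weighted_ratings(wr):
--     """
--     It integrates the result of weighted ratings.
--     :param wr: result from weighted rating
--     :return: dic: {movie: (highest) weighted rating}
--     """
--     result = {}
--     for k1, v1 in wr.items():
--         for k2, v2 in v1.items():
--             for mov, rat in v2.items():
--                 # mov : movie, rat: rating
--                 if mov not in result:
--                     result[mov] = rat
--                 elif rat > result[mov]:
--                     result[mov] = rat
--     return result
-- ===== SOURCE B (Python) =====
-- def total_weighted_ratings(wr):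
--     """
--     It integrates the result of weighted ratings.
--     :param wr: result from weighted rating
--     :return: dic: {movie: (highest) weighted rating}
--     """
--     # Phase 1: flatten the nested dicts into a list of (movie, rating) pairs.
--     pairs = [(mov, rat)
--              for v1 in wr.values()
--              for v2 in v1.values()
--              for mov, rat in v2.items()]
--     # Phase 2: group all ratings by movie.
--     groups = {}
--     for mov, rat in pairs:
--         groups.setdefault(mov, []).append(rat)
--     # Phase 3: aggregate each movie's ratings with max.
--     return {mov: max(rats) for mov, rats in groups.items()}
-- ===== Notes on version B (the rewrite author's own statement) =====
-- stated objective: simpler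
-- what changed: Replaces A's in-loop running per-movie maximum (if/elif inside the triple nested loop) by three separate phases: flatten the nested dicts into a (movie, rating) pair list, group all ratings by movie into lists, then a final dict comprehension taking max of each group.
import Mathlib
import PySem

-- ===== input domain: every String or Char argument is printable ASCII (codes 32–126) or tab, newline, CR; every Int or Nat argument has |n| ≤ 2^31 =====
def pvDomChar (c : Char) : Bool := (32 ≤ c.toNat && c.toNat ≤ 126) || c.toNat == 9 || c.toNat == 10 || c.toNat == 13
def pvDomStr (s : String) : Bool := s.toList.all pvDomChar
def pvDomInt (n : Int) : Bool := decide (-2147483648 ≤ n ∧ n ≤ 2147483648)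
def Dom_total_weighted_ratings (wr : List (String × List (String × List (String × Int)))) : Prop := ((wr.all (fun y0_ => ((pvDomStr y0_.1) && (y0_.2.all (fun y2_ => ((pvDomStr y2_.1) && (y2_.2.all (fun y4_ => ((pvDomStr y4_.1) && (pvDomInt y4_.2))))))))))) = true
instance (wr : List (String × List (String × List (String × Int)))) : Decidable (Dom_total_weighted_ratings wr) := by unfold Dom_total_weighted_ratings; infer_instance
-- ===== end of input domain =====

-- B replaces A's in-loop running maximum by three phases (flatten to pairs, group by movie, max per group); objective: simpler decomposition, same cost.

-- ===== PORT A =====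
-- A's inner loop body: running per-movie maximum ('if mov not in result / elif rat > result[mov]')
def twrStepA (result : PySem.Dict String Int) (p : String × Int) : PySem.Dict String Int :=
  match result.get? p.1 with
  | none => result.insert p.1 p.2
  | some cur => if p.2 > cur then result.insert p.1 p.2 else result

def total_weighted_ratings (wr : List (String × List (String × List (String × Int)))) : List (String × Int) :=
  (wr.foldl (fun result p1 =>
      p1.2.foldl (fun result p2 =>
        p2.2.foldl twrStepA result) result) PySem.Dict.empty).items

-- ===== PORT B =====
-- max(rats) on a nonempty int list; the .getD 0 default is never reached since group values are nonempty
def twrMax (l : List Int) : Int := (PySem.List.max? l (fun x => x)).getD 0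

-- B's grouping step: groups.setdefault(mov, []).append(rat) = modify with default []
def twrStepG (g : PySem.Dict String (List Int)) (p : String × Int) : PySem.Dict String (List Int) :=
  g.modify p.1 [] (fun l => l ++ [p.2])

def total_weighted_ratings_alt (wr : List (String × List (String × List (String × Int)))) : List (String × Int) :=
  -- Phase 1: flatten into (movie, rating) pairs
  let pairs := wr.flatMap (fun p1 => p1.2.flatMap (fun p2 => p2.2))
  -- Phase 2: group ratings by movie
  let groups := pairs.foldl twrStepG PySem.Dict.empty
  -- Phase 3: aggregate each group with max
  groups.items.map (fun q => (q.1, twrMax q.2))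

-- ===== PRECONDITION & SPEC =====
def Spec_total_weighted_ratings (wr : List (String × List (String × List (String × Int)))) (out : List (String × Int)) : Prop := out = total_weighted_ratings_alt wr
instance (wr : List (String × List (String × List (String × Int)))) (out : List (String × Int)) : Decidable (Spec_total_weighted_ratings wr out) := by unfold Spec_total_weighted_ratings; infer_instance

-- ===== CLAIM (what is proved, stated in full; the proofs are below) =====
def Claim_equal_total_weighted_ratings : Prop := ∀ (wr : List (String × List (String × List (String × Int)))), Dom_total_weighted_ratings wr → Spec_total_weighted_ratings wr (total_weighted_ratings wr)

-- ===== LEMMAS AND PROOFS =====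

-- A's running-max dict is the image of B's groups dict under "take the max of each group's list".
def twrMapMax (g : PySem.Dict String (List Int)) : PySem.Dict String Int :=
  PySem.Dict.mk (g.items.map (fun q => (q.1, twrMax q.2)))

theorem twrMax_append (rs : List Int) (m r : Int)
    (h : PySem.List.max? rs (fun x => x) = some m) :
    twrMax (rs ++ [r]) = if m < r then r else m := by
  unfold twrMax PySem.List.max? at *
  rw [List.foldl_append, h]
  simp only [List.foldl]
  split <;> simp

theorem items_twrMapMax (g : PySem.Dict String (List Int)) :
    (twrMapMax g).items = g.items.map (fun q => (q.1, twrMax q.2)) := rfl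

theorem get?_twrMapMax (g : PySem.Dict String (List Int)) (k : String) :
    (twrMapMax g).get? k = (g.get? k).map twrMax := by
  unfold twrMapMax PySem.Dict.get?
  rw [List.find?_map]
  simp [Function.comp_def]

theorem contains_twrMapMax (g : PySem.Dict String (List Int)) (k : String) :
    (twrMapMax g).contains k = g.contains k := by
  rw [PySem.Dict.contains_eq_isSome_get?, PySem.Dict.contains_eq_isSome_get?, get?_twrMapMax]
  cases g.get? k <;> rfl

theorem twrStep_comm (g : PySem.Dict String (List Int)) (p : String × Int)
    (hnd : g.keys.Nodup) (hne : ∀ q ∈ g.items, q.2 ≠ []) :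
    twrStepA (twrMapMax g) p = twrMapMax (twrStepG g p) := by
  obtain ⟨k, r⟩ := p
  unfold twrStepA twrStepG
  rw [get?_twrMapMax]
  cases hg : g.get? k with
  | none =>
    -- fresh movie: both sides append
    have hc : g.contains k = false := by
      rw [PySem.Dict.contains_eq_isSome_get?, hg]; rfl
    have hcm : (twrMapMax g).contains k = false := by rw [contains_twrMapMax]; exact hc
    simp only [Option.map_none]
    rw [PySem.Dict.modify, PySem.Dict.getD_of_not_contains g [] hc]
    apply PySem.Dict.ext
    rw [PySem.Dict.items_insert_of_not_contains _ _ hcm, items_twrMapMax, items_twrMapMax,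
        PySem.Dict.items_insert_of_not_contains _ _ hc, List.map_append]
    simp [twrMax, PySem.List.max?]
  | some rs =>
    have hmem : (k, rs) ∈ g.items := PySem.Dict.mem_items_of_get?_eq_some g hg
    have hrs : rs ≠ [] := hne _ hmem
    obtain ⟨m, hm⟩ : ∃ m, PySem.List.max? rs (fun x => x) = some m := by
      cases h : PySem.List.max? rs (fun x => x) with
      | none => exact absurd ((PySem.List.max?_eq_none_iff rs _).mp h) hrs
      | some m => exact ⟨m, rfl⟩
    have htm : twrMax rs = m := by rw [twrMax, hm]; rfl
    have hc : g.contains k = true := by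
      rw [PySem.Dict.contains_eq_isSome_get?, hg]; rfl
    have hcm : (twrMapMax g).contains k = true := by rw [contains_twrMapMax]; exact hc
    have hgd : g.getD k [] = rs := PySem.Dict.getD_of_get?_eq_some g [] hg
    simp only [Option.map_some, htm]
    rw [PySem.Dict.modify, hgd]
    have hitems : (twrMapMax (g.insert k (rs ++ [r]))).items
        = g.items.map (fun q => if q.1 == k then (k, twrMax (rs ++ [r])) else (q.1, twrMax q.2)) := by
      unfold twrMapMax
      rw [PySem.Dict.items_insert_of_contains _ _ hc, List.map_map]
      apply List.map_congr_left
      intro q _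
      by_cases hq : (q.1 == k) = true
      · have hk : q.1 = k := by simpa using hq
        simp [hk]
      · have hk : ¬(q.1 = k) := by simpa using hq
        simp [hk]
    split
    · -- r > m : new maximum
      next hgt =>
      apply PySem.Dict.ext
      rw [hitems, twrMax_append rs m r hm, if_pos hgt,
          PySem.Dict.items_insert_of_contains _ _ hcm, items_twrMapMax, List.map_map]
      apply List.map_congr_left
      intro q _
      by_cases hq : (q.1 == k) = true
      · have hk : q.1 = k := by simpa using hq
        simp [hk]
      · have hk : ¬(q.1 = k) := by simpa using hq
        simp [hk]
    · -- r ≤ m : dict unchanged on the A side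
      next hle =>
      apply PySem.Dict.ext
      rw [hitems, twrMax_append rs m r hm, if_neg (by omega), items_twrMapMax]
      apply Eq.symm
      apply List.map_congr_left
      rintro ⟨q1, q2⟩ hqmem
      by_cases hq : q1 == k
      · have hk : q1 = k := by simpa using hq
        subst hk
        have : g.get? q1 = some q2 := PySem.Dict.get?_of_mem_items g hqmem hnd
        rw [hg] at this
        have hrq : rs = q2 := by injection this
        simp [← hrq, htm]
      · simp [hq]

theorem nodup_stepG (g : PySem.Dict String (List Int)) (p : String × Int)
    (hnd : g.keys.Nodup) : (twrStepG g p).keys.Nodup := by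
  unfold twrStepG
  rw [PySem.Dict.keys_modify]
  by_cases hc : g.contains p.1
  · rw [PySem.Dict.keys_insert_of_contains g _ hc]; exact hnd
  · rw [PySem.Dict.keys_insert_of_not_contains g _ (by simpa using hc)]
    rw [List.nodup_append]
    refine ⟨hnd, List.nodup_singleton _, ?_⟩
    intro a ha b hb
    rw [List.mem_singleton] at hb
    subst hb
    rw [PySem.Dict.contains_iff_mem_keys] at hc
    intro heq
    exact hc (heq ▸ ha)

theorem nonempty_stepG (g : PySem.Dict String (List Int)) (p : String × Int)
    (hne : ∀ q ∈ g.items, q.2 ≠ []) : ∀ q ∈ (twrStepG g p).items, q.2 ≠ [] := by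
  unfold twrStepG PySem.Dict.modify
  intro q hq
  rw [PySem.Dict.mem_items_insert] at hq
  rcases hq with h | ⟨h, _⟩
  · subst h
    simp
  · exact hne _ h

theorem twrFold_comm (ps : List (String × Int)) (g : PySem.Dict String (List Int))
    (hnd : g.keys.Nodup) (hne : ∀ q ∈ g.items, q.2 ≠ []) :
    ps.foldl twrStepA (twrMapMax g) = twrMapMax (ps.foldl twrStepG g) := by
  induction ps generalizing g with
  | nil => rfl
  | cons p t ih =>
    simp only [List.foldl_cons]
    rw [twrStep_comm g p hnd hne]
    exact ih _ (nodup_stepG g p hnd) (nonempty_stepG g p hne)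

theorem twrA_flat (wr : List (String × List (String × List (String × Int)))) (d : PySem.Dict String Int) :
    wr.foldl (fun result p1 => p1.2.foldl (fun result p2 => p2.2.foldl twrStepA result) result) d
      = (wr.flatMap (fun p1 => p1.2.flatMap (fun p2 => p2.2))).foldl twrStepA d := by
  induction wr generalizing d with
  | nil => rfl
  | cons h t ih =>
    simp only [List.foldl_cons, List.flatMap_cons, List.foldl_append, ih]
    congr 1
    induction h.2 generalizing d with
    | nil => rfl
    | cons h2 t2 ih2 => simp only [List.foldl_cons, List.flatMap_cons, List.foldl_append, ih2]

-- ===== VERDICT (by name: the statement is the Claim_ definition above) =====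
theorem total_weighted_ratings_spec : Claim_equal_total_weighted_ratings := by
  intro wr _
  unfold Spec_total_weighted_ratings total_weighted_ratings total_weighted_ratings_alt
  rw [twrA_flat]
  have h := twrFold_comm (wr.flatMap (fun p1 => p1.2.flatMap (fun p2 => p2.2))) PySem.Dict.empty
    (by simp [PySem.Dict.keys, PySem.Dict.empty]) (by simp [PySem.Dict.empty])
  have hbase : twrMapMax PySem.Dict.empty = PySem.Dict.empty := rfl
  rw [hbase] at h
  rw [h]
  rfl
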